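-- pv_equiv track=rewrite | github.com/chaukhaivinh/BaiTapLon_AI | ai/src/ai_algorithms.py | hill_climbing_path
-- ===== SOURCE A (Python) =====
-- def hill_climbing_path(start, goal):
--     path = []
--     current = start
--
--     for _ in range(50):
--         path.append(current)
--         if current == goal:
--             return path
--
--         cx, cy = current
--         gx, gy = goal
--         nx, ny = cx, cy
--
--         if cx < gx:
--             nx += 1
--         elif cx > gx:
--             nx -= 1
--
--         if cy < gy:
--             ny += 1
--         elif cy > gy:
--             ny -= 1
--
--         current = (nx, ny)
--
--     return path
-- ===== SOURCE B (Python) =====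
-- def hill_climbing_path(start, goal):
--     cx, cy = start
--     gx, gy = goal
--     sx = (gx > cx) - (gx < cx)
--     sy = (gy > cy) - (gy < cy)
--     dx = abs(gx - cx)
--     dy = abs(gy - cy)
--     n = min(50, max(dx, dy) + 1)
--     return [start] + [(cx + sx * min(t, dx), cy + sy * min(t, dy)) for t in range(1, n)]
-- ===== Notes on version B (the rewrite author's own statement) =====
-- stated objective: simpler
-- what changed: Replaces the 50-iteration step-by-step diagonal simulation with a closed-form index-to-position formula: the t-th path point is (cx+sx*min(t,dx), cy+sy*min(t,dy)) for t < min(50, max(dx,dy)+1).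
import Mathlib
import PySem

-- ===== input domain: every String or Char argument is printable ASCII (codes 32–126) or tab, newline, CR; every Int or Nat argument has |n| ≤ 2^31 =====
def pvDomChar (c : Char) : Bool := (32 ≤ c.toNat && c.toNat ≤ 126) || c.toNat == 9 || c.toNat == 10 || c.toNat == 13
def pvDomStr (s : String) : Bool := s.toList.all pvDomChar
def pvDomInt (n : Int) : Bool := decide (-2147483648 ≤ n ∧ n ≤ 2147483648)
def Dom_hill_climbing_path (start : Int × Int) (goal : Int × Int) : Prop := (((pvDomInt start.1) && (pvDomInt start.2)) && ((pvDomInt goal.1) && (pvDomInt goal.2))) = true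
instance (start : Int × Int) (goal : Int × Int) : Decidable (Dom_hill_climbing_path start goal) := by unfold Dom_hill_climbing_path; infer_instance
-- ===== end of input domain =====

-- B replaces A's 50-iteration step-by-step simulation with a closed-form
-- position formula (objective: simpler, and faster on far-apart endpoints).

-- ===== PORT A =====
-- one loop body: move each coordinate one unit toward the goal
def hcStep (current : Int × Int) (goal : Int × Int) : Int × Int :=
  let cx := current.1
  let cy := current.2
  let gx := goal.1
  let gy := goal.2
  let nx := if cx < gx then cx + 1 else if cx > gx then cx - 1 else cx
  let ny := if cy < gy then cy + 1 else if cy > gy then cy - 1 else cy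
  (nx, ny)

-- the 'for _ in range(50)' loop with its early return, as fuel recursion
def hcLoop (goal : Int × Int) (fuel : Nat) (current : Int × Int) (path : List (Int × Int)) : List (Int × Int) :=
  match fuel with
  | 0 => path
  | f + 1 =>
    let path := path ++ [current]
    if current == goal then path
    else hcLoop goal f (hcStep current goal) path

def hill_climbing_path (start : Int × Int) (goal : Int × Int) : List (Int × Int) :=
  hcLoop goal 50 start []

-- ===== PORT B =====
def hill_climbing_path_alt (start : Int × Int) (goal : Int × Int) : List (Int × Int) :=
  let cx := start.1
  let cy := start.2
  let gx := goal.1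
  let gy := goal.2
  let sx : Int := (if gx > cx then 1 else 0) - (if gx < cx then 1 else 0)
  let sy : Int := (if gy > cy then 1 else 0) - (if gy < cy then 1 else 0)
  let dx := |gx - cx|
  let dy := |gy - cy|
  let n := min 50 (max dx dy + 1)
  [start] ++ (PySem.List.pyRange 1 n 1).map (fun t => (cx + sx * min t dx, cy + sy * min t dy))

-- ===== PRECONDITION & SPEC =====
def Spec_hill_climbing_path (start : Int × Int) (goal : Int × Int) (out : List (Int × Int)) : Prop := out = hill_climbing_path_alt start goal
instance (start : Int × Int) (goal : Int × Int) (out : List (Int × Int)) : Decidable (Spec_hill_climbing_path start goal out) := by unfold Spec_hill_climbing_path; infer_instance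

-- ===== CLAIM (what is proved, stated in full; the proofs are below) =====
def Claim_equal_hill_climbing_path : Prop := ∀ (start : Int × Int) (goal : Int × Int), Dom_hill_climbing_path start goal → Spec_hill_climbing_path start goal (hill_climbing_path start goal)

-- ===== LEMMAS AND PROOFS =====

-- signed step size toward b, and distance, per coordinate
def hcSgn (a b : Int) : Int := (if b > a then 1 else 0) - (if b < a then 1 else 0)

-- the closed-form list of the first n positions, starting at c, walking toward g
def hcPos (c g : Int × Int) (t : Int) : Int × Int :=
  (c.1 + hcSgn c.1 g.1 * min t |g.1 - c.1|, c.2 + hcSgn c.2 g.2 * min t |g.2 - c.2|)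

def hcList (c g : Int × Int) (n : Int) : List (Int × Int) :=
  (PySem.List.pyRange 0 n 1).map (hcPos c g)

lemma int_abs_ite (x : Int) : |x| = if 0 ≤ x then x else -x := by
  rcases abs_cases x with ⟨h, h2⟩ | ⟨h, h2⟩ <;> split_ifs <;> omega

lemma hcPos_zero (c g : Int × Int) : hcPos c g 0 = c := by
  simp [hcPos]

-- one-coordinate shift: position t+1 from a equals position t from the stepped point
lemma hcCoord (a b : Int) (t : Int) (ht : 0 ≤ t) :
    (if a < b then a + 1 else if a > b then a - 1 else a) +
      hcSgn (if a < b then a + 1 else if a > b then a - 1 else a) b *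
        min t |b - (if a < b then a + 1 else if a > b then a - 1 else a)| =
      a + hcSgn a b * min (t + 1) |b - a| := by
  unfold hcSgn
  simp only [int_abs_ite]
  split_ifs <;> omega

lemma hcStep_shift (c g : Int × Int) (t : Int) (ht : 0 ≤ t) :
    hcPos (hcStep c g) g t = hcPos c g (t + 1) := by
  obtain ⟨cx, cy⟩ := c
  obtain ⟨gx, gy⟩ := g
  simp only [hcPos, hcStep, Prod.mk.injEq]
  exact ⟨hcCoord cx gx t ht, hcCoord cy gy t ht⟩

lemma hcList_cons (c g : Int × Int) (n : Int) (hn : 0 < n) :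
    hcList c g n = c :: hcList (hcStep c g) g (n - 1) := by
  unfold hcList
  rw [PySem.List.pyRange_one_cons hn]
  simp only [List.map_cons, hcPos_zero]
  congr 1
  · have h0 : (0 : Int) + 1 = 1 := by norm_num
    rw [h0]
    have h1 : PySem.List.pyRange 1 n 1 = (PySem.List.pyRange 0 (n - 1) 1).map (fun k => k + 1) := by
      rw [PySem.List.pyRange_one, PySem.List.pyRange_one, List.map_map]
      have : n - 1 - 0 = n - 1 := by omega
      rw [this]
      apply List.map_congr_left
      intro k _
      simp; omega
    rw [h1, List.map_map]
    apply List.map_congr_left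
    intro k hk
    rw [PySem.List.mem_pyRange_one] at hk
    simp only [Function.comp]
    exact (hcStep_shift c g k hk.1).symm

-- distance to goal after one step, when not at the goal
lemma hcDist_step (c g : Int × Int) (hne : c ≠ g) :
    max |g.1 - (hcStep c g).1| |g.2 - (hcStep c g).2| = max |g.1 - c.1| |g.2 - c.2| - 1 := by
  obtain ⟨cx, cy⟩ := c
  obtain ⟨gx, gy⟩ := g
  have h : ¬(cx = gx ∧ cy = gy) := by
    intro h; exact hne (by simp [h.1, h.2])
  simp only [hcStep, int_abs_ite]
  split_ifs <;> omega

-- the loop computes the closed-form list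
lemma hcLoop_eq (fuel : Nat) (g c : Int × Int) (path : List (Int × Int)) :
    hcLoop g fuel c path = path ++ hcList c g (min (fuel : Int) (max |g.1 - c.1| |g.2 - c.2| + 1)) := by
  induction fuel generalizing c path with
  | zero =>
    have : min (0 : Int) (max |g.1 - c.1| |g.2 - c.2| + 1) = 0 := by
      have := abs_nonneg (g.1 - c.1); have := abs_nonneg (g.2 - c.2); omega
    simp [hcLoop, this, hcList]
  | succ f ih =>
    simp only [hcLoop]
    by_cases hc : c = g
    · subst hc
      simp only [beq_self_eq_true, if_true]
      have hmin : min ((f + 1 : Nat) : Int) (max |c.1 - c.1| |c.2 - c.2| + 1) = 1 := by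
        simp
      rw [hmin]
      have h01 : PySem.List.pyRange 0 1 1 = [0] := by decide
      simp [hcList, h01, hcPos_zero]
    · have hbeq : (c == g) = false := by simp [hc]
      simp only [hbeq]
      rw [ih (hcStep c g) (path ++ [c])]
      have hd := hcDist_step c g hc
      have habs : (0 : Int) ≤ max |g.1 - c.1| |g.2 - c.2| := by
        have := abs_nonneg (g.1 - c.1); have := abs_nonneg (g.2 - c.2); omega
      have hpos : (0 : Int) < max |g.1 - c.1| |g.2 - c.2| := by
        rcases lt_or_eq_of_le habs with h | h
        · exact h
        · exfalso
          have h1 : |g.1 - c.1| = 0 ∧ |g.2 - c.2| = 0 := by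
            have := abs_nonneg (g.1 - c.1); have := abs_nonneg (g.2 - c.2); omega
          apply hc
          have e1 : c.1 = g.1 := by have := abs_eq_zero.mp h1.1; omega
          have e2 : c.2 = g.2 := by have := abs_eq_zero.mp h1.2; omega
          exact Prod.ext e1 e2
      have hcons := hcList_cons c g (min ((f + 1 : Nat) : Int) (max |g.1 - c.1| |g.2 - c.2| + 1))
        (by push_cast; omega)
      rw [hcons]
      have harg : min ((f + 1 : Nat) : Int) (max |g.1 - c.1| |g.2 - c.2| + 1) - 1 =
          min ((f : Nat) : Int) (max |g.1 - (hcStep c g).1| |g.2 - (hcStep c g).2| + 1) := by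
        rw [hd]; push_cast; omega
      rw [harg]
      simp

-- B's port equals the closed-form list
lemma alt_eq_hcList (start goal : Int × Int) :
    hill_climbing_path_alt start goal =
      hcList start goal (min 50 (max |goal.1 - start.1| |goal.2 - start.2| + 1)) := by
  unfold hill_climbing_path_alt hcList
  have hpos : (0 : Int) < min 50 (max |goal.1 - start.1| |goal.2 - start.2| + 1) := by
    have := abs_nonneg (goal.1 - start.1); have := abs_nonneg (goal.2 - start.2); omega
  rw [PySem.List.pyRange_one_cons hpos]
  simp only [List.map_cons, hcPos_zero, List.singleton_append]
  rfl

-- ===== VERDICT (by name: the statement is the Claim_ definition above) =====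
theorem hill_climbing_path_spec : Claim_equal_hill_climbing_path := by
  intro start goal _
  unfold Spec_hill_climbing_path hill_climbing_path
  rw [hcLoop_eq, alt_eq_hcList]
  norm_num
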